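-- pv_equiv track=rewrite | github.com/ashudnsingh/CodeSignal | Graphs/Contours of Everything/016 - isFlower.py | isFlower
-- ===== SOURCE A (Python) =====
-- def isFlower(adj):
--     n = len(adj)
--
--     for i in range(n):
--         if adj[i][i]:
--             return False
--
--     degrees = [sum(row) for row in adj]
--
--     if n-1 not in degrees:
--         # no center
--         return False
--
--     center = degrees.index(n-1)
--     degrees.pop(center)
--     if len(set(degrees)) == 1:
--         petal = degrees[0]
--         if petal < 2:
--             # petals too small
--             return False
--     else:
--         # differing sized petals
--         return False
--
--     # check that the petals are actually complete (as opposed to a wheel or something else/in between)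
--     stars = []
--     for i in range(n):
--         if i != center:
--             stars.append({j for j in range(n) if j == i or adj[i][j]})
--
--     for a in stars:
--         for b in stars:
--             if len(a&b) not in (1, petal+1):
--                 # petals must be identical or overlap at the center only
--                 return False
--     return True
-- ===== SOURCE B (Python) =====
-- def _pairs_ok(sets):
--     # every unordered pair of distinct neighbourhood sets must meet in exactly one vertex
--     if not sets:
--         return True
--     s, rest = sets[0], sets[1:]
--     return all(len(s & t) == 1 for t in rest) and _pairs_ok(rest)
--
--
-- def isFlower(adj):
--     n = len(adj)
--     if any(row[i] for i, row in enumerate(adj)):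
--         return False
--     deg = [sum(row) for row in adj]
--     center = next((i for i, d in enumerate(deg) if d == n - 1), None)
--     if center is None:
--         return False
--     petals = deg[:center] + deg[center + 1:]
--     if not petals:
--         return False
--     petal = petals[0]
--     if petal < 2 or any(d != petal for d in petals):
--         return False
--     # group the closed neighbourhood sets: only the DISTINCT sets matter
--     distinct = list(dict.fromkeys(
--         frozenset(j for j in range(n) if j == i or row[j])
--         for i, row in enumerate(adj) if i != center))
--     if any(len(s) not in (1, petal + 1) for s in distinct):
--         return False
--     return _pairs_ok(distinct)
-- ===== Notes on version B (the rewrite author's own statement) =====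
-- stated objective: alternative
-- what changed: B replaces A's all-pairs intersection scan over every per-vertex star set by a single dedup of the star sets (dict.fromkeys on frozensets) followed by a size check per distinct set and an exactly-one-common-vertex check per unordered pair of distinct sets, using the fact that two distinct sets can never intersect in petal+1 elements.
-- outside the precondition, e.g. on isFlower([[0, 1, 1], [1, 0], [1, 0, 0]]): A returns False, B returns False
import Mathlib
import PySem

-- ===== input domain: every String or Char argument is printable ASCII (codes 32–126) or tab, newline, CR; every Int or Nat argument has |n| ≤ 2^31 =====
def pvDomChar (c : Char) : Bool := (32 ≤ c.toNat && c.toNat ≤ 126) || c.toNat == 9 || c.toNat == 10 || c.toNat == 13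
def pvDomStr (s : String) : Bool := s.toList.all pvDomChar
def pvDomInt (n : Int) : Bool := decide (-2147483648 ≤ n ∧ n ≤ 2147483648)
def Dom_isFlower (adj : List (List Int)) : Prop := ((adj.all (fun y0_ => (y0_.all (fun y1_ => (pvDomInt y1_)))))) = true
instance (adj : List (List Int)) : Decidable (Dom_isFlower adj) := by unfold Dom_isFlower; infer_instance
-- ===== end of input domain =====

-- B dedups the star sets first and then checks sizes plus one-common-vertex per distinct pair,
-- instead of A's |a & b| ∈ {1, petal+1} test over every ordered pair of (possibly repeated) star sets.


-- ===== PORT A =====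
def isFlower (adj : List (List Int)) : Bool :=
  let n : Int := PySem.List.len adj
  -- for i in range(n): if adj[i][i]: return False
  if (PySem.List.pyRange 0 n 1).any
      (fun i => PySem.List.pyGetD (PySem.List.pyGetD adj i []) i 0 != 0) then false
  else
    let degrees := adj.map (fun row => row.sum)
    -- if n-1 not in degrees: return False; center = degrees.index(n-1)
    match PySem.List.index? degrees (n - 1) with
    | none => false
    | some center =>
      let degrees2 := degrees.eraseIdx center       -- degrees.pop(center)
      if PySem.Set.len (PySem.Set.ofList degrees2) == 1 then
        let petal := PySem.List.pyGetD degrees2 0 0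
        if petal < 2 then false
        else
          let stars := ((PySem.List.pyRange 0 n 1).filter (fun i => i != (center : Int))).map
            (fun i => PySem.Set.ofList ((PySem.List.pyRange 0 n 1).filter
              (fun j => j == i || PySem.List.pyGetD (PySem.List.pyGetD adj i []) j 0 != 0)))
          stars.all (fun a => stars.all (fun b =>
            PySem.Set.len (PySem.Set.inter a b) == 1 ||
            PySem.Set.len (PySem.Set.inter a b) == petal + 1))
      else false

-- ===== PORT B =====
-- B's recursive helper _pairs_ok: every unordered pair of distinct sets meets in exactly one vertex
def pvPairsOK : List (PySem.Set Int) → Bool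
  | [] => true
  | s :: rest =>
    rest.all (fun t => PySem.Set.len (PySem.Set.inter s t) == 1) && pvPairsOK rest

-- Python B dedups by frozenset; here every star set is materialised as the increasing filter of
-- range(n) (Set.ofList of a nodup list), so frozenset equality coincides with list equality and
-- dict.fromkeys is exactly PySem.List.dedup.
def isFlower_alt (adj : List (List Int)) : Bool :=
  let n : Int := PySem.List.len adj
  if (PySem.List.enumerate adj).any (fun pr => PySem.List.pyGetD pr.2 pr.1 0 != 0) then false
  else
    let deg := adj.map (fun row => row.sum)
    match PySem.List.index? deg (n - 1) with
    | none => false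
    | some center =>
      let petals := PySem.List.slice deg none (some (center : Int)) ++
                    PySem.List.slice deg (some ((center : Int) + 1)) none
      if petals.isEmpty then false
      else
        let petal := PySem.List.pyGetD petals 0 0
        if petal < 2 || petals.any (fun d => d != petal) then false
        else
          let distinct := PySem.List.dedup
            (((PySem.List.enumerate adj).filter (fun pr => pr.1 != (center : Int))).map
              (fun pr => PySem.Set.ofList ((PySem.List.pyRange 0 n 1).filter
                (fun j => j == pr.1 || PySem.List.pyGetD pr.2 j 0 != 0))))
          distinct.all (fun s => PySem.Set.len s == 1 || PySem.Set.len s == petal + 1) &&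
            pvPairsOK distinct

-- ===== PRECONDITION & SPEC =====
-- Pre_ excludes exactly the ragged inputs on which A hits an IndexError: it admits an input when
-- the diagonal scan hits a nonzero entry before any too-short row (A returns False there), or all
-- diagonal reads are in range and zero and then either no vertex has degree n-1 (A returns False)
-- or every row has length at least n (no further read can be out of range).  It also drops the
-- A-returning ragged corner where a short row is never read (e.g. the petal-size check fails
-- first): not an adjacency matrix, and one closed-form clause per read keeps Pre_ readable.
def Pre_isFlower (adj : List (List Int)) : Prop :=
  (∃ i < adj.length,
      (∀ k < i, k < (adj.getD k []).length ∧ (adj.getD k []).getD k 0 = 0) ∧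
      i < (adj.getD i []).length ∧ (adj.getD i []).getD i 0 ≠ 0)
  ∨ ((∀ i < adj.length, i < (adj.getD i []).length ∧ (adj.getD i []).getD i 0 = 0) ∧
      (((adj.length : Int) - 1) ∉ adj.map (fun row => row.sum)
        ∨ ∀ row ∈ adj, adj.length ≤ row.length))
instance (adj : List (List Int)) : Decidable (Pre_isFlower adj) := by
  unfold Pre_isFlower; infer_instance

def pvWitness_isFlower : List (List Int) :=
  [[0, 1, 1, 1, 1], [1, 0, 1, 0, 0], [1, 1, 0, 0, 0], [1, 0, 0, 0, 1], [1, 0, 0, 1, 0]]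

def Spec_isFlower (adj : List (List Int)) (out : Bool) : Prop := out = isFlower_alt adj
instance (adj : List (List Int)) (out : Bool) : Decidable (Spec_isFlower adj out) := by
  unfold Spec_isFlower; infer_instance

-- ===== CLAIM (what is proved, stated in full; the proofs are below) =====
def Claim_equal_isFlower : Prop :=
  ∀ (adj : List (List Int)), Dom_isFlower adj → Pre_isFlower adj →
    Spec_isFlower adj (isFlower adj)

-- ===== LEMMAS AND PROOFS =====

-- pvPairsOK is the pairwise "intersect in exactly one vertex" condition
lemma pvPairsOK_iff (l : List (PySem.Set Int)) :
    pvPairsOK l = true ↔ l.Pairwise (fun s t => (PySem.Set.inter s t).length = 1) := by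
  induction l with
  | nil => simp [pvPairsOK]
  | cons s rest ih => simp [pvPairsOK, List.pairwise_cons, ih, PySem.Set.len, and_comm]

-- two nodup lists intersect in the same number of elements in either order
lemma inter_length_comm (s t : List Int) (hs : s.Nodup) (ht : t.Nodup) :
    (PySem.Set.inter s t).length = (PySem.Set.inter t s).length := by
  refine List.Perm.length_eq ?_
  rw [List.perm_ext_iff_of_nodup (PySem.Set.nodup_inter _ _ hs) (PySem.Set.nodup_inter _ _ ht)]
  intro a
  rw [PySem.Set.mem_inter, PySem.Set.mem_inter, and_comm]

lemma inter_self_eq (s : List Int) : PySem.Set.inter s s = s := by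
  rw [PySem.Set.inter, List.filter_eq_self]
  intro a ha
  rw [PySem.Set.contains_iff]; exact ha

-- a full-length intersection means s ⊆ t
lemma subset_of_inter_length (s t : List Int) (h : (PySem.Set.inter s t).length = s.length) :
    ∀ x ∈ s, x ∈ t := by
  intro x hx
  have h2 : ∀ a ∈ s, (PySem.Set.contains t a) = true := by
    rw [← List.length_filter_eq_length_iff]; exact h
  have := h2 x hx
  rwa [PySem.Set.contains_iff] at this

-- two filters of the same nodup list with the same members are equal
lemma filter_eq_of_mem_iff (l : List Int) (hl : l.Nodup) (p q : Int → Bool)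
    (h : ∀ x, x ∈ l.filter p ↔ x ∈ l.filter q) : l.filter p = l.filter q := by
  induction l with
  | nil => simp
  | cons a t ih =>
    have hnd := (List.nodup_cons.mp hl)
    have ht : ∀ x, x ∈ t.filter p ↔ x ∈ t.filter q := by
      intro x
      by_cases hxa : x = a
      · subst hxa
        constructor <;> intro hx <;> exact absurd (List.mem_of_mem_filter hx) hnd.1
      · have := h x
        simp [List.mem_filter, List.mem_cons, hxa] at this ⊢
        tauto
    have hrec := ih hnd.2 ht
    by_cases hp : p a <;> by_cases hq : q a <;> simp [hp, hq, hrec]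
    · have := (h a).mp (by simp [List.mem_filter, hp])
      simp [hq] at this
    · have := (h a).mpr (by simp [List.mem_filter, hq])
      simp [hp] at this

-- a nodup list whose members all equal c has length one
lemma length_eq_one_of_all_eq (l : List Int) (hl : l.Nodup) (c : Int) (hc : c ∈ l)
    (hall : ∀ y ∈ l, y = c) : l.length = 1 := by
  match l, hc with
  | [a], _ => rfl
  | a :: b :: t, _ =>
    have ha := hall a (by simp)
    have hb := hall b (by simp)
    rw [List.nodup_cons] at hl
    exact absurd (by rw [ha, hb] : a = b) (fun hab => hl.1 (hab ▸ List.mem_cons_self ..))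

-- A's len(set(degrees)) == 1 test, characterised on the popped degree list
lemma ofList_len_one_iff (p0 : Int) (rest : List Int) :
    (PySem.Set.ofList (p0 :: rest)).length = 1 ↔ ∀ y ∈ p0 :: rest, y = p0 := by
  constructor
  · intro h
    rcases List.length_eq_one_iff.mp h with ⟨x, hx⟩
    intro y hy
    have hy' : y ∈ PySem.Set.ofList (p0 :: rest) := (PySem.Set.mem_ofList _ _).mpr hy
    have hp0 : p0 ∈ PySem.Set.ofList (p0 :: rest) :=
      (PySem.Set.mem_ofList _ _).mpr (List.mem_cons_self ..)
    rw [hx] at hy' hp0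
    simp at hy' hp0
    rw [hy', hp0]
  · intro h
    refine length_eq_one_of_all_eq _ (PySem.Set.nodup_ofList _) p0
      ((PySem.Set.mem_ofList _ _).mpr (List.mem_cons_self ..)) ?_
    intro y hy
    exact h y ((PySem.Set.mem_ofList _ _).mp hy)

-- THE CORE LEMMA: A's all-ordered-pairs check over stars equals B's size check plus
-- distinct-pairs check over the dedup of stars.
lemma core_lemma (p : Int) (hp : 2 ≤ p) (stars : List (PySem.Set Int))
    (hnd : ∀ s ∈ stars, List.Nodup s)
    (hcanon : ∀ s ∈ stars, ∀ t ∈ stars, (∀ x, x ∈ s ↔ x ∈ t) → s = t) :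
    (stars.all (fun a => stars.all (fun b =>
        PySem.Set.len (PySem.Set.inter a b) == 1 ||
        PySem.Set.len (PySem.Set.inter a b) == p + 1)))
    = ((PySem.List.dedup stars).all
        (fun s => PySem.Set.len s == 1 || PySem.Set.len s == p + 1) &&
       pvPairsOK (PySem.List.dedup stars)) := by
  rw [Bool.eq_iff_iff]
  simp only [List.all_eq_true, Bool.or_eq_true, beq_iff_eq, Bool.and_eq_true, pvPairsOK_iff,
    PySem.Set.len, PySem.List.mem_dedup]
  constructor
  · intro hA
    constructor
    · intro s hs
      have := hA s hs s hs
      rwa [inter_self_eq s] at this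
    · refine (PySem.List.nodup_dedup stars).pairwise_of_forall_ne ?_
      intro a ha b hb hne
      have ha' : a ∈ stars := (PySem.List.mem_dedup _ _).mp ha
      have hb' : b ∈ stars := (PySem.List.mem_dedup _ _).mp hb
      rcases hA a ha' b hb' with h1 | h2
      · exact_mod_cast h1
      · -- |a ∩ b| = p+1 forces a = b, contradicting hne
        exfalso
        have hsa := hA a ha' a ha'
        rw [inter_self_eq a] at hsa
        have hsb := hA b hb' b hb'
        rw [inter_self_eq b] at hsb
        have hle_a : (PySem.Set.inter a b).length ≤ a.length := List.length_filter_le _ _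
        have hcomm := inter_length_comm a b (hnd a ha') (hnd b hb')
        have hle_b : (PySem.Set.inter b a).length ≤ b.length := List.length_filter_le _ _
        have heqa : (PySem.Set.inter a b).length = a.length := by
          rcases hsa with h | h <;> omega
        have heqb : (PySem.Set.inter b a).length = b.length := by
          rcases hsb with h | h <;> omega
        have hab := subset_of_inter_length a b heqa
        have hba := subset_of_inter_length b a heqb
        exact hne (hcanon a ha' b hb' (fun x => ⟨fun hx => hab x hx, fun hx => hba x hx⟩))
  · rintro ⟨hsz, hpw⟩ a ha b hb
    by_cases hab : a = b
    · subst hab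
      rw [inter_self_eq a]
      exact hsz a ha
    · left
      have hpw' : List.Pairwise
          (fun s t => (PySem.Set.inter s t).length = 1 ∨ (PySem.Set.inter t s).length = 1)
          (PySem.List.dedup stars) := hpw.imp (fun h => Or.inl h)
      have hsymm : Symmetric
          (fun (s t : PySem.Set Int) =>
            (PySem.Set.inter s t).length = 1 ∨ (PySem.Set.inter t s).length = 1) := by
        intro s t h; exact h.symm
      have h0 := hpw'.forall hsymm ((PySem.List.mem_dedup _ _).mpr ha)
        ((PySem.List.mem_dedup _ _).mpr hb) hab
      have hcomm := inter_length_comm a b (hnd a ha) (hnd b hb)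
      have : (PySem.Set.inter a b).length = 1 := by rcases h0 with h | h <;> omega
      exact_mod_cast this

-- helper: the two star-set lists coincide
lemma stars_eq (adj : List (List Int)) (center : Nat) :
    (((PySem.List.enumerate adj).filter (fun pr => pr.1 != (center : Int))).map
      (fun pr => PySem.Set.ofList ((PySem.List.pyRange 0 (PySem.List.len adj) 1).filter
        (fun j => j == pr.1 || PySem.List.pyGetD pr.2 j 0 != 0))))
    = ((PySem.List.pyRange 0 (PySem.List.len adj) 1).filter (fun i => i != (center : Int))).map
      (fun i => PySem.Set.ofList ((PySem.List.pyRange 0 (PySem.List.len adj) 1).filter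
        (fun j => j == i || PySem.List.pyGetD (PySem.List.pyGetD adj i []) j 0 != 0))) := by
  rw [PySem.List.enumerate_eq_map_pyRange adj [], List.filter_map, List.map_map]
  rfl

-- every star set is the increasing filter of range(n): nodup and canonical
lemma star_eq_filter (n : Int) (q : Int → Bool) :
    PySem.Set.ofList ((PySem.List.pyRange 0 n 1).filter q)
      = (PySem.List.pyRange 0 n 1).filter q :=
  PySem.Set.ofList_eq_self_of_nodup _ ((PySem.List.nodup_pyRange_one 0 n).filter q)

lemma stars_nodup (adj : List (List Int)) (center : Nat) :
    ∀ s ∈ ((PySem.List.pyRange 0 (PySem.List.len adj) 1).filter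
        (fun i => i != (center : Int))).map
      (fun i => PySem.Set.ofList ((PySem.List.pyRange 0 (PySem.List.len adj) 1).filter
        (fun j => j == i || PySem.List.pyGetD (PySem.List.pyGetD adj i []) j 0 != 0))),
      List.Nodup s := by
  intro s hs
  rcases List.mem_map.mp hs with ⟨i, _, rfl⟩
  rw [star_eq_filter]
  exact (PySem.List.nodup_pyRange_one 0 _).filter _

lemma stars_canon (adj : List (List Int)) (center : Nat) :
    ∀ s ∈ ((PySem.List.pyRange 0 (PySem.List.len adj) 1).filter
        (fun i => i != (center : Int))).map
      (fun i => PySem.Set.ofList ((PySem.List.pyRange 0 (PySem.List.len adj) 1).filter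
        (fun j => j == i || PySem.List.pyGetD (PySem.List.pyGetD adj i []) j 0 != 0))),
    ∀ t ∈ ((PySem.List.pyRange 0 (PySem.List.len adj) 1).filter
        (fun i => i != (center : Int))).map
      (fun i => PySem.Set.ofList ((PySem.List.pyRange 0 (PySem.List.len adj) 1).filter
        (fun j => j == i || PySem.List.pyGetD (PySem.List.pyGetD adj i []) j 0 != 0))),
      (∀ x, x ∈ s ↔ x ∈ t) → s = t := by
  intro s hs t ht hmem
  rcases List.mem_map.mp hs with ⟨i, _, rfl⟩
  rcases List.mem_map.mp ht with ⟨i', _, rfl⟩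
  rw [star_eq_filter] at hmem ⊢
  rw [star_eq_filter] at hmem ⊢
  exact filter_eq_of_mem_iff _ (PySem.List.nodup_pyRange_one 0 _) _ _ hmem

-- ===== VERDICT (by name: the statement is the Claim_ definition above) =====
theorem isFlower_spec : Claim_equal_isFlower := by
  intro adj _ _
  unfold Spec_isFlower isFlower isFlower_alt
  simp only []
  -- the diagonal tests coincide: enumerate(adj) is range(n) paired with the rows
  have hdiag : ((PySem.List.enumerate adj).any
        (fun pr => PySem.List.pyGetD pr.2 pr.1 0 != 0))
      = ((PySem.List.pyRange 0 (PySem.List.len adj) 1).any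
        (fun i => PySem.List.pyGetD (PySem.List.pyGetD adj i []) i 0 != 0)) := by
    rw [PySem.List.enumerate_eq_map_pyRange adj [], List.any_map]
    rfl
  rw [hdiag]
  by_cases hd : ((PySem.List.pyRange 0 (PySem.List.len adj) 1).any
      (fun i => PySem.List.pyGetD (PySem.List.pyGetD adj i []) i 0 != 0)) = true
  · rw [if_pos hd, if_pos hd]
  · rw [if_neg hd, if_neg hd]
    rcases hidx : PySem.List.index? (adj.map (fun row => row.sum))
        (PySem.List.len adj - 1) with _ | center
    · dsimp only []
    · simp only []
      -- B's two slices are A's degrees.pop(center)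
      have hpet : PySem.List.slice (adj.map (fun row => row.sum)) none (some (center : Int)) ++
            PySem.List.slice (adj.map (fun row => row.sum)) (some ((center : Int) + 1)) none
          = (adj.map (fun row => row.sum)).eraseIdx center := by
        rw [show ((center : Int) + 1) = (((center + 1 : Nat)) : Int) by push_cast; ring]
        rw [PySem.List.slice_to_natCast, PySem.List.slice_from_natCast,
          List.eraseIdx_eq_take_drop_succ]
      rw [hpet]
      rcases hdl : (adj.map (fun row => row.sum)).eraseIdx center with _ | ⟨p0, rest⟩
      · rw [hdl]
        simp [PySem.Set.len, PySem.Set.ofList]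
      · rw [hdl]
        simp only [List.isEmpty_cons, Bool.false_eq_true, if_false, PySem.List.pyGetD_zero_cons]
        by_cases hall : ∀ y ∈ p0 :: rest, y = p0
        · have hA1 : (PySem.Set.len (PySem.Set.ofList (p0 :: rest)) == 1) = true := by
            simp only [PySem.Set.len, beq_iff_eq]
            exact_mod_cast (ofList_len_one_iff _ _).mpr hall
          have hBany : ((p0 :: rest).any (fun d => d != p0)) = false := by
            rw [List.any_eq_false]
            intro d hd
            simpa using hall d hd
          rw [if_pos hA1, hBany]
          by_cases h2 : p0 < 2
          · rw [if_pos h2]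
            rw [if_pos (by simp [h2])]
          · rw [if_neg h2]
            rw [if_neg (by simp [h2])]
            rw [stars_eq adj center]
            exact core_lemma p0 (by omega) _ (stars_nodup adj center) (stars_canon adj center)
        · have hA1 : (PySem.Set.len (PySem.Set.ofList (p0 :: rest)) == 1) = false := by
            simp only [PySem.Set.len, beq_eq_false_iff_ne, ne_eq]
            intro hlen
            exact hall ((ofList_len_one_iff _ _).mp (by exact_mod_cast hlen))
          have hBany : ((p0 :: rest).any (fun d => d != p0)) = true := by
            push Not at hall
            rcases hall with ⟨y, hy, hne⟩
            rw [List.any_eq_true]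
            exact ⟨y, hy, by simpa using hne⟩
          rw [if_neg (by rw [hA1]; exact Bool.false_ne_true), hBany]
          rw [if_pos (by simp)]
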